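-- pv_equiv track=rewrite | github.com/Sari27/DI4ProjetPerceiverIO | random_masked_language.py | stringWithNewWords
-- ===== SOURCE A (Python) =====
-- def stringWithNewWords(real_str, found_str, words_indexes_in_str):
--     #fournit la chaine avec les mots trouvés
--     #les Strings sont immuables, donc on utilise une version de found_str sous forme de liste pour la modifier
--     predicted_str = list(found_str[:len(real_str)])     #apres len(real_str), il n'y a que des 0
--     range_for_overwriting = [i for i in range(0,len(predicted_str))]    #les indices des caracteres a ecraser
--
--     even_len_words_indexes_in_str = len(words_indexes_in_str) - len(words_indexes_in_str) % 2 #"corrige" l'ANOMALIE de analysis.ipynb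
--     for index_even_iterator in range(0, even_len_words_indexes_in_str, 2):
--         #on elimine tous les indexes des caracteres qui ne constituent pas les mots devines
--         for index_to_delete in range(words_indexes_in_str[index_even_iterator], words_indexes_in_str[index_even_iterator + 1]):
--             range_for_overwriting.remove(index_to_delete)
--
--     #on ecrase tous les caracteres qui ne constituent pas les mots devines par ceux de la String originale
--     for iterator_for_overwriting in range_for_overwriting:
--         predicted_str[iterator_for_overwriting] = real_str[iterator_for_overwriting]
--
--     #on reconstitue une String a partir de la liste de caracteres
--     predicted_str = "".join(predicted_str)
--     return predicted_str
-- ===== SOURCE B (Python) =====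
-- def stringWithNewWords(real_str, found_str, words_indexes_in_str):
--     # Copy the real string once, then splice the found words in with one slice assignment per pair.
--     m = min(len(real_str), len(found_str))
--     out = list(real_str[:m])
--     w = words_indexes_in_str
--     for k in range(0, len(w) - len(w) % 2, 2):
--         if w[k] < w[k + 1]:
--             a = min(max(w[k], 0), m)
--             b = min(max(w[k + 1], 0), m)
--             if a < b:
--                 out[a:b] = found_str[a:b]
--     return "".join(out)
-- ===== Notes on version B (the rewrite author's own statement) =====
-- stated objective: faster
-- what changed: Replaced the remove-each-covered-index-from-a-list-then-overwrite-every-remaining-index scheme by copying real_str[:m] once and splicing found_str[a:b] over each nonempty word interval with a single slice assignment.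
import Mathlib
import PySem

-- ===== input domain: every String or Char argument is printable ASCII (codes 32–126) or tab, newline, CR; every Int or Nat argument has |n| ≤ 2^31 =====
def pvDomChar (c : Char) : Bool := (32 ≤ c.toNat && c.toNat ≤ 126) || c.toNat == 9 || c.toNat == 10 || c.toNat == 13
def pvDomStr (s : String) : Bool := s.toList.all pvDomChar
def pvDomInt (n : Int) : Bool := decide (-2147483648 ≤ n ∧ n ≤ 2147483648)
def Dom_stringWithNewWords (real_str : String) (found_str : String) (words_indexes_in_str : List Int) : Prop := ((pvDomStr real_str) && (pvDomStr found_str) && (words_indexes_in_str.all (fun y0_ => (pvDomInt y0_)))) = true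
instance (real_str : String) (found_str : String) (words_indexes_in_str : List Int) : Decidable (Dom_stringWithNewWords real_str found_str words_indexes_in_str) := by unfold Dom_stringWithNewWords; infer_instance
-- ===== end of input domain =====

-- B replaces A's repeated list.remove scans and per-index overwrite loop by one copy of the
-- real string and a slice assignment per word interval (objective: faster).

-- ===== PORT A =====
-- the double remove-loop of A: returns none where Python's list.remove raises ValueError
def pvARemove (w : List Int) (rfo : List Int) : Option (List Int) :=
  (PySem.List.pyRange 0 ((w.length : Int) - (w.length : Int) % 2) 2).foldl
    (fun acc i => acc.bind fun r =>
      (PySem.List.pyRange (PySem.List.pyGetD w i 0) (PySem.List.pyGetD w (i + 1) 0) 1).foldl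
        (fun acc2 j => acc2.bind fun r2 => PySem.List.remove? r2 j) (some r))
    (some rfo)

def stringWithNewWords (real_str : String) (found_str : String) (words_indexes_in_str : List Int) : String :=
  let realL := real_str.toList
  let predicted := PySem.List.slice found_str.toList none (some (realL.length : Int))
  match pvARemove words_indexes_in_str (PySem.List.pyRange 0 (predicted.length : Int) 1) with
  | none => ""   -- Python raises ValueError here; excluded by Pre_
  | some r =>
      String.ofList
        (r.foldl (fun p i => PySem.List.pySetD p i (PySem.List.pyGetD realL i ' ')) predicted)

-- ===== PORT B =====
-- one loop body of Source B:  if w[k] < w[k+1]: clamp to [0,m] and do out[a:b] = found_str[a:b]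
def pvSpliceStep (foundL : List Char) (m : Nat) (w : List Int) (out : List Char) (k : Int) : List Char :=
  if PySem.List.pyGetD w k 0 < PySem.List.pyGetD w (k + 1) 0 then
    let a := min (max (PySem.List.pyGetD w k 0) 0) (m : Int)
    let b := min (max (PySem.List.pyGetD w (k + 1) 0) 0) (m : Int)
    if a < b then
      PySem.List.slice out none (some a) ++ PySem.List.slice foundL (some a) (some b)
        ++ PySem.List.slice out (some b) none
    else out
  else out

def stringWithNewWords_alt (real_str : String) (found_str : String) (words_indexes_in_str : List Int) : String :=
  let m := min real_str.toList.length found_str.toList.length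
  String.ofList
    ((PySem.List.pyRange 0 ((words_indexes_in_str.length : Int) - (words_indexes_in_str.length : Int) % 2) 2).foldl
      (pvSpliceStep found_str.toList m words_indexes_in_str)
      (real_str.toList.take m))

-- ===== PRECONDITION & SPEC =====
-- Pre_ excludes exactly the inputs on which A's list.remove raises ValueError: a (nonempty)
-- index pair reaching outside [0, min(len(real_str), len(found_str))), or two overlapping pairs.
def Pre_stringWithNewWords (real_str : String) (found_str : String) (words_indexes_in_str : List Int) : Prop :=
  ∀ k, k < words_indexes_in_str.length / 2 →
    (words_indexes_in_str.getD (2 * k) 0 < words_indexes_in_str.getD (2 * k + 1) 0 →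
      0 ≤ words_indexes_in_str.getD (2 * k) 0 ∧
      words_indexes_in_str.getD (2 * k + 1) 0 ≤
        (min real_str.toList.length found_str.toList.length : Int)) ∧
    ∀ l, l < k →
      words_indexes_in_str.getD (2 * l) 0 < words_indexes_in_str.getD (2 * l + 1) 0 →
      words_indexes_in_str.getD (2 * k) 0 < words_indexes_in_str.getD (2 * k + 1) 0 →
      words_indexes_in_str.getD (2 * k + 1) 0 ≤ words_indexes_in_str.getD (2 * l) 0 ∨
      words_indexes_in_str.getD (2 * l + 1) 0 ≤ words_indexes_in_str.getD (2 * k) 0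

instance (real_str : String) (found_str : String) (words_indexes_in_str : List Int) : Decidable (Pre_stringWithNewWords real_str found_str words_indexes_in_str) := by
  unfold Pre_stringWithNewWords; infer_instance

def pvWitness_stringWithNewWords : String × String × List Int := ("abcd", "WXYZ", [1, 3])

def Spec_stringWithNewWords (real_str : String) (found_str : String) (words_indexes_in_str : List Int) (out : String) : Prop := out = stringWithNewWords_alt real_str found_str words_indexes_in_str
instance (real_str : String) (found_str : String) (words_indexes_in_str : List Int) (out : String) : Decidable (Spec_stringWithNewWords real_str found_str words_indexes_in_str out) := by unfold Spec_stringWithNewWords; infer_instance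

-- ===== CLAIM (what is proved, stated in full; the proofs are below) =====
def Claim_equal_stringWithNewWords : Prop := ∀ (real_str : String) (found_str : String) (words_indexes_in_str : List Int), Dom_stringWithNewWords real_str found_str words_indexes_in_str → Pre_stringWithNewWords real_str found_str words_indexes_in_str → Spec_stringWithNewWords real_str found_str words_indexes_in_str (stringWithNewWords real_str found_str words_indexes_in_str)

-- ===== LEMMAS AND PROOFS =====

-- k-th index pair of words_indexes_in_str
def pvA (w : List Int) (k : Nat) : Int := w.getD (2 * k) 0
def pvB (w : List Int) (k : Nat) : Int := w.getD (2 * k + 1) 0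
-- "i is covered by one of the first t pairs"
def pvCov (w : List Int) (t : Nat) (i : Int) : Bool :=
  (List.range t).any (fun k => decide (pvA w k ≤ i) && decide (i < pvB w k))
-- Pre_ restated through pvA/pvB with the length bound as a Nat cast
def pvPre (M : Nat) (w : List Int) : Prop :=
  ∀ k, k < w.length / 2 →
    (pvA w k < pvB w k → 0 ≤ pvA w k ∧ pvB w k ≤ (M : Int)) ∧
    ∀ l, l < k → pvA w l < pvB w l → pvA w k < pvB w k →
      pvB w k ≤ pvA w l ∨ pvB w l ≤ pvA w k

theorem pvCov_succ (w : List Int) (t : Nat) (i : Int) :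
    pvCov w (t + 1) i = (pvCov w t i || (decide (pvA w t ≤ i) && decide (i < pvB w t))) := by
  simp [pvCov, List.range_succ]

theorem pvRange2 (L : Nat) :
    PySem.List.pyRange 0 ((L : Int) - (L : Int) % 2) 2
      = (List.range (L / 2)).map (fun k => ((2 * k : Nat) : Int)) := by
  rw [PySem.List.pyRange_of_pos _ _ (by norm_num)]
  have hcount : (if (0:Int) < (L : Int) - (L : Int) % 2 then
      (((L : Int) - (L : Int) % 2 - 0 + 2 - 1) / 2).toNat else 0) = L / 2 := by
    split_ifs with h <;> omega
  rw [hcount]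
  apply List.map_congr_left
  intro k _
  push_cast; ring

theorem pvRemoveFold (ds : List Int) : ∀ (r : List Int), r.Nodup → ds.Nodup →
    (∀ j ∈ ds, j ∈ r) →
    ds.foldl (fun acc j => acc.bind fun r2 => PySem.List.remove? r2 j) (some r)
      = some (r.filter (fun x => decide (x ∉ ds))) := by
  induction ds with
  | nil => intro r _ _ _; simp
  | cons d ds ih =>
      intro r hr hds hmem
      simp only [List.foldl_cons, Option.bind_some]
      rw [PySem.List.remove?_eq_some_erase r d (hmem d (by simp))]
      rw [hr.erase_eq_filter d]
      rw [ih _ (hr.filter _) (List.nodup_cons.mp hds).2 ?memb]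
      · congr 1
        rw [List.filter_filter]
        apply List.filter_congr
        intro x _
        by_cases hxd : x = d <;> by_cases hxds : x ∈ ds <;> simp [hxd, hxds]
      · intro j hj
        rw [List.mem_filter]
        refine ⟨hmem j (by simp [hj]), ?_⟩
        have : j ≠ d := fun h => (List.nodup_cons.mp hds).1 (h ▸ hj)
        simp [this]

theorem pvAInv (M : Nat) (w : List Int) (hpre : pvPre M w) :
    ∀ t, t ≤ w.length / 2 →
    ((List.range t).map (fun k => ((2 * k : Nat) : Int))).foldl
      (fun acc i => acc.bind fun r =>
        (PySem.List.pyRange (PySem.List.pyGetD w i 0) (PySem.List.pyGetD w (i + 1) 0) 1).foldl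
          (fun acc2 j => acc2.bind fun r2 => PySem.List.remove? r2 j) (some r))
      (some (PySem.List.pyRange 0 (M : Int) 1))
    = some ((PySem.List.pyRange 0 (M : Int) 1).filter (fun x => !pvCov w t x)) := by
  intro t
  induction t with
  | zero => intro _; simp [pvCov]
  | succ t ih =>
      intro ht
      rw [List.range_succ, List.map_append, List.foldl_append, ih (by omega)]
      simp only [List.map_cons, List.map_nil, List.foldl_cons, List.foldl_nil, Option.bind_some]
      have hga : PySem.List.pyGetD w ((2 * t : Nat) : Int) 0 = pvA w t := by
        rw [PySem.List.pyGetD_natCast]; rfl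
      have hgb : PySem.List.pyGetD w (((2 * t : Nat) : Int) + 1) 0 = pvB w t := by
        have : (((2 * t : Nat) : Int) + 1) = ((2 * t + 1 : Nat) : Int) := by push_cast; ring
        rw [this, PySem.List.pyGetD_natCast]; rfl
      rw [hga, hgb]
      by_cases hne : pvA w t < pvB w t
      · have hbd := (hpre t (by omega)).1 hne
        rw [pvRemoveFold _ _ ((PySem.List.nodup_pyRange_one 0 (M:Int)).filter _)
              (PySem.List.nodup_pyRange_one _ _) ?memb]
        · congr 1
          rw [List.filter_filter]
          apply List.filter_congr
          intro x _
          simp only [pvCov_succ, PySem.List.mem_pyRange_one, Bool.not_or]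
          by_cases h1 : pvCov w t x <;> by_cases h2 : pvA w t ≤ x ∧ x < pvB w t <;>
            simp [h1, h2] <;> omega
        · intro j hj
          rw [PySem.List.mem_pyRange_one] at hj
          rw [List.mem_filter, PySem.List.mem_pyRange_one]
          refine ⟨⟨by omega, by omega⟩, ?_⟩
          simp only [Bool.not_eq_eq_eq_not, Bool.not_true, Bool.not_eq_true']
          by_contra hcov
          simp only [Bool.not_eq_false, pvCov, List.any_eq_true, List.mem_range] at hcov
          obtain ⟨l, hl, hcl⟩ := hcov
          simp only [Bool.and_eq_true, decide_eq_true_eq] at hcl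
          have hlne : pvA w l < pvB w l := by omega
          have := (hpre t (by omega)).2 l hl hlne hne
          omega
      · have hnil : PySem.List.pyRange (pvA w t) (pvB w t) 1 = [] :=
          PySem.List.pyRange_one_eq_nil (by omega)
        rw [hnil]
        simp only [List.foldl_nil, Option.bind_some]
        congr 1
        apply List.filter_congr
        intro x _
        simp only [pvCov_succ]
        have : ¬ (pvA w t ≤ x ∧ x < pvB w t) := by omega
        by_cases h1 : pvCov w t x <;> simp [h1] <;> omega

theorem pvARemove_eq (M : Nat) (w : List Int) (hpre : pvPre M w) :
    pvARemove w (PySem.List.pyRange 0 (M : Int) 1)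
      = some ((PySem.List.pyRange 0 (M : Int) 1).filter (fun x => !pvCov w (w.length / 2) x)) := by
  unfold pvARemove
  rw [pvRange2 w.length]
  exact pvAInv M w hpre (w.length / 2) le_rfl

theorem pvSplice_getD (out foundL : List Char) (a b : Nat) (hab : a ≤ b) (hbm : b ≤ out.length)
    (hof : out.length ≤ foundL.length) (j : Nat) (hj : j < out.length) :
    (out.take a ++ (foundL.drop a).take (b - a) ++ out.drop b).getD j ' '
      = if a ≤ j ∧ j < b then foundL.getD j ' ' else out.getD j ' ' := by
  have hmidlen : ((foundL.drop a).take (b - a)).length = b - a := by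
    simp [List.length_take, List.length_drop]; omega
  have htl : (out.take a).length = a := by simp [List.length_take]; omega
  rw [List.getD_eq_getElem?_getD, List.getElem?_append, List.length_append, htl, hmidlen]
  by_cases hja : j < a
  · rw [if_pos (by omega), List.getElem?_append, htl, if_pos hja, List.getElem?_take,
        if_pos hja, if_neg (by omega), List.getD_eq_getElem?_getD]
  · by_cases hjb : j < b
    · rw [if_pos (by omega), List.getElem?_append, htl, if_neg (by omega), List.getElem?_take,
          if_pos (by omega), List.getElem?_drop]
      have he : a + (j - a) = j := by omega
      rw [he, if_pos (by omega), List.getD_eq_getElem?_getD]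
    · rw [if_neg (by omega), List.getElem?_drop]
      have he : b + (j - (a + (b - a))) = j := by omega
      rw [he, if_neg (by omega), List.getD_eq_getElem?_getD]

theorem pvSplice_length (out foundL : List Char) (a b : Nat) (hab : a ≤ b) (hbm : b ≤ out.length)
    (hof : out.length ≤ foundL.length) :
    (out.take a ++ (foundL.drop a).take (b - a) ++ out.drop b).length = out.length := by
  simp only [List.length_append, List.length_take, List.length_drop]
  omega

theorem pvBInv (w : List Int) (realL foundL : List Char) (m : Nat)
    (hmr : m ≤ realL.length) (hmf : m ≤ foundL.length) : ∀ t,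
    (((List.range t).map (fun k => ((2 * k : Nat) : Int))).foldl
        (pvSpliceStep foundL m w) (realL.take m)).length = m ∧
    ∀ j : Nat, j < m →
    (((List.range t).map (fun k => ((2 * k : Nat) : Int))).foldl
        (pvSpliceStep foundL m w) (realL.take m)).getD j ' '
      = if pvCov w t (j : Int) then foundL.getD j ' ' else realL.getD j ' ' := by
  intro t
  induction t with
  | zero =>
      constructor
      · simp [hmr]
      · intro j hj
        simp [pvCov, List.getD_eq_getElem?_getD, List.getElem?_take, hj]
  | succ t ih =>
      obtain ⟨ihlen, ihget⟩ := ih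
      rw [List.range_succ, List.map_append]
      simp only [List.map_cons, List.map_nil, List.foldl_append, List.foldl_cons, List.foldl_nil]
      simp only [pvSpliceStep]
      have hga : PySem.List.pyGetD w ((2 * t : Nat) : Int) 0 = pvA w t := by
        rw [PySem.List.pyGetD_natCast]; rfl
      have hgb : PySem.List.pyGetD w (((2 * t : Nat) : Int) + 1) 0 = pvB w t := by
        have : (((2 * t : Nat) : Int) + 1) = ((2 * t + 1 : Nat) : Int) := by push_cast; ring
        rw [this, PySem.List.pyGetD_natCast]; rfl
      rw [hga, hgb]
      set st := ((List.range t).map (fun k => ((2 * k : Nat) : Int))).foldl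
        (pvSpliceStep foundL m w) (realL.take m) with hst
      set a : Int := min (max (pvA w t) 0) (m : Int) with ha
      set b : Int := min (max (pvB w t) 0) (m : Int) with hb
      by_cases hraw : pvA w t < pvB w t
      case neg =>
        rw [if_neg hraw]
        refine ⟨ihlen, fun j hj => ?_⟩
        rw [ihget j hj, pvCov_succ]
        have h2 : ¬ (pvA w t ≤ (j:Int) ∧ (j:Int) < pvB w t) := by omega
        by_cases h1 : pvCov w t (j:Int) <;> simp [h1, h2]
      rw [if_pos hraw]
      by_cases hab : a < b
      · rw [if_pos hab]
        have h0a : (0:Int) ≤ a := by omega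
        have h0b : (0:Int) ≤ b := by omega
        rw [PySem.List.slice_to st h0a, PySem.List.slice_from st h0b,
            PySem.List.slice_toNat foundL h0a h0b]
        have habn : a.toNat ≤ b.toNat := by omega
        have hbl : b.toNat ≤ st.length := by rw [ihlen]; omega
        have hofl : st.length ≤ foundL.length := by rw [ihlen]; omega
        constructor
        · rw [pvSplice_length st foundL a.toNat b.toNat habn hbl hofl, ihlen]
        · intro j hj
          rw [pvSplice_getD st foundL a.toNat b.toNat habn hbl hofl j (by rw [ihlen]; exact hj)]
          rw [ihget j hj, pvCov_succ]
          by_cases h2 : pvA w t ≤ (j:Int) ∧ (j:Int) < pvB w t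
          · rw [if_pos (show a.toNat ≤ j ∧ j < b.toNat by omega)]
            by_cases h1 : pvCov w t (j:Int) <;> simp [h1, h2]
          · rw [if_neg (show ¬ (a.toNat ≤ j ∧ j < b.toNat) by omega)]
            by_cases h1 : pvCov w t (j:Int) <;> simp [h1, h2]
      · rw [if_neg hab]
        refine ⟨ihlen, fun j hj => ?_⟩
        rw [ihget j hj, pvCov_succ]
        have h2 : ¬ (pvA w t ≤ (j:Int) ∧ (j:Int) < pvB w t) := by omega
        by_cases h1 : pvCov w t (j:Int) <;> simp [h1, h2]

theorem pvOvFold_length (f : Int → Char) (r : List Int) : ∀ (pred : List Char),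
    (r.foldl (fun p i => PySem.List.pySetD p i (f i)) pred).length = pred.length := by
  induction r with
  | nil => intro pred; rfl
  | cons i r ih => intro pred; simp only [List.foldl_cons]; rw [ih]; simp [PySem.List.length_pySetD]

theorem pvOvFold (f : Int → Char) (r : List Int) : ∀ (pred : List Char),
    (∀ i ∈ r, 0 ≤ i ∧ i < (pred.length : Int)) → ∀ j : Nat, j < pred.length →
    (r.foldl (fun p i => PySem.List.pySetD p i (f i)) pred).getD j ' '
      = if (j : Int) ∈ r then f j else pred.getD j ' ' := by
  induction r with
  | nil => intro pred _ j hj; simp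
  | cons i r ih =>
      intro pred hb j hj
      have hi := hb i (by simp)
      simp only [List.foldl_cons]
      rw [PySem.List.pySetD_of_nonneg _ _ hi.1]
      rw [ih _ (by intro x hx; simpa using hb x (by simp [hx])) j (by simpa using hj)]
      have hset : (pred.set i.toNat (f i)).getD j ' ' = if i.toNat = j then f i else pred.getD j ' ' := by
        simp only [List.getD_eq_getElem?_getD, List.getElem?_set]
        split_ifs with h1 h2 <;> simp_all <;> omega
      by_cases hjr : (j : Int) ∈ r
      · simp [hjr]
      · by_cases hji : (j : Int) = i
        · have hij : i.toNat = j := by omega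
          have hm : ((j:Int) ∈ i :: r) := by simp [hji]
          rw [if_pos hm, hset, if_pos hij, hji]
          simp
        · have hij : ¬ i.toNat = j := by omega
          have hm : ¬ ((j:Int) ∈ i :: r) := by simp [hji, hjr]
          rw [if_neg hm, hset, if_neg hij]
          simp [hjr]

theorem pvPre_conv (rs fs : String) (w : List Int)
    (hpre : Pre_stringWithNewWords rs fs w) :
    pvPre (min rs.toList.length fs.toList.length) w := by
  intro k hk
  refine ⟨fun hlt => ?_, (hpre k hk).2⟩
  have h := (hpre k hk).1 hlt
  unfold pvA pvB
  refine ⟨h.1, ?_⟩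
  have h2 := h.2
  push_cast at h2 ⊢
  omega

-- ===== VERDICT (by name: the statement is the Claim_ definition above) =====
theorem stringWithNewWords_spec : Claim_equal_stringWithNewWords := by
  intro rs fs w _ hpre
  have hpre' := pvPre_conv rs fs w hpre
  unfold Spec_stringWithNewWords stringWithNewWords stringWithNewWords_alt
  simp only [PySem.List.slice_to_natCast]
  have hplen : (fs.toList.take rs.toList.length).length = min rs.toList.length fs.toList.length := by
    simp [Nat.min_comm]
  rw [hplen, pvARemove_eq _ w hpre']
  simp only []
  rw [pvRange2 w.length]
  congr 1
  have hBInv := pvBInv w rs.toList fs.toList (min rs.toList.length fs.toList.length)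
    (Nat.min_le_left _ _) (Nat.min_le_right _ _) (w.length / 2)
  apply List.ext_getElem
  · rw [pvOvFold_length, hplen, hBInv.1]
  · intro j hj1 hj2
    have hjM : j < min rs.toList.length fs.toList.length := by
      rwa [pvOvFold_length, hplen] at hj1
    have hr0mem : ∀ i ∈ (PySem.List.pyRange 0 ((min rs.toList.length fs.toList.length : Nat) : Int) 1).filter
        (fun x => !pvCov w (w.length / 2) x),
        0 ≤ i ∧ i < ((fs.toList.take rs.toList.length).length : Int) := by
      intro i hi
      rw [List.mem_filter, PySem.List.mem_pyRange_one] at hi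
      rw [hplen]
      exact ⟨hi.1.1, hi.1.2⟩
    rw [← List.getD_eq_getElem _ ' ' hj1,
        pvOvFold _ _ _ hr0mem j (by rwa [hplen]),
        ← List.getD_eq_getElem _ ' ' hj2, hBInv.2 j hjM]
    have hmem : ((j : Int) ∈ (PySem.List.pyRange 0 ((min rs.toList.length fs.toList.length : Nat) : Int) 1).filter
        (fun x => !pvCov w (w.length / 2) x)) ↔ ¬ pvCov w (w.length / 2) (j : Int) := by
      rw [List.mem_filter, PySem.List.mem_pyRange_one]
      simp only [Bool.not_eq_eq_eq_not, Bool.not_true, Bool.not_eq_true']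
      constructor
      · intro h; simp [h.2]
      · intro h; exact ⟨⟨by omega, by exact_mod_cast Nat.cast_lt.mpr hjM⟩, by simp [h]⟩
    have htake : (fs.toList.take rs.toList.length).getD j ' ' = fs.toList.getD j ' ' := by
      have hjr : j < rs.length := by
        have h1 : j < rs.toList.length := by omega
        simpa using h1
      simp [List.getD_eq_getElem?_getD, List.getElem?_take, hjr]
    rw [htake]
    by_cases hcov : pvCov w (w.length / 2) (j : Int)
    · have hnm : ¬ ((j : Int) ∈ _) := fun h => (hmem.mp h) hcov
      rw [if_neg hnm, if_pos hcov]
    · rw [if_pos (hmem.mpr hcov), if_neg hcov, PySem.List.pyGetD_natCast]
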